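-- pv_equiv track=rewrite | github.com/jmsiktar/FibBins | countComps.py | indexOutFib
-- ===== SOURCE A (Python) =====
-- def listFib(k): #lists the Fibonacci numbers up to the kth one when k >= 3,
--     #except for the 0 and the first 1
--     assert(k >= 3)
--     fibList = [1, 2]
--     for i in range(3, k + 1):
--         nextFib = fibList[i - 2] + fibList[i - 3]
--         fibList.append(nextFib)
--     return fibList
--
-- def indexOutFib(n): #spits out index of largest k so that F_k <= n
--     assert(n >= 1)
--     if n == 1: return 1
--     elif n == 2: return 2
--     excessiveList = listFib(n + 1)
--     index = 1
--     while excessiveList[index] <= n: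
--         index += 1
--     return index
-- ===== SOURCE B (Python) =====
-- def indexOutFib(n):
--     assert(n >= 1)
--     def fibpair(m):  # (fib(m), fib(m+1)) by fast doubling, standard fib(1)=fib(2)=1
--         if m == 0:
--             return (0, 1)
--         a, b = fibpair(m // 2)
--         c = a * (2 * b - a)
--         d = a * a + b * b
--         if m % 2 == 1:
--             return (d, c + d)
--         return (c, d)
--     def fib(m):
--         return fibpair(m)[0]
--     hi = 1
--     while fib(hi) <= n:  # exponential search for an upper bracket
--         hi *= 2
--     lo = 1               # fib(1) = 1 <= n
--     while hi - lo > 1:   # binary search: invariant fib(lo) <= n < fib(hi)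
--         mid = (lo + hi) // 2
--         if fib(mid) <= n:
--             lo = mid
--         else:
--             hi = mid
--     return lo - 1
-- ===== Notes on version B (the rewrite author's own statement) =====
-- stated objective: faster
-- what changed: Instead of materialising a list of n+1 Fibonacci numbers and scanning it linearly, B computes individual Fibonacci values by integer fast doubling and finds the largest index with fib(m) <= n by exponential search plus binary search, returning m-1.
import Mathlib
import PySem

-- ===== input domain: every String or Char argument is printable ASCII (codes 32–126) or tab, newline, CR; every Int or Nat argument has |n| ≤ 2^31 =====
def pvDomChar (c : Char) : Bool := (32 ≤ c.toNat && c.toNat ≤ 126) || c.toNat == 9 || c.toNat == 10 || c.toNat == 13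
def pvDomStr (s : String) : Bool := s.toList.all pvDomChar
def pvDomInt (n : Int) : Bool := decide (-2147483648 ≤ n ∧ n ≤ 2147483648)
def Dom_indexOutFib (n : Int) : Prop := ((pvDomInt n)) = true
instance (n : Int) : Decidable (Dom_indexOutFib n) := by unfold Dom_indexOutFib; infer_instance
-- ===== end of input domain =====

-- B replaces A's Fibonacci list of n+1 entries and its linear scan by fast-doubling
-- Fibonacci values with exponential + binary search on the index (measured faster).

-- ===== PORT A =====
-- listFib(k): fold of the 'for i in range(3, k+1)' loop over the growing list;
-- the indices i-2, i-3 are in range whenever the loop body runs (i ≥ 3), so pyGetD's default is never used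
def listFibA (k : Int) : List Int :=
  (PySem.List.pyRange 3 (k + 1) 1).foldl
    (fun fibList i =>
      fibList ++ [PySem.List.pyGetD fibList (i - 2) 0 + PySem.List.pyGetD fibList (i - 3) 0])
    [1, 2]

-- the 'while excessiveList[index] <= n' loop; fuel (the list length) only totalizes it —
-- inside Pre_ the loop stops strictly before the fuel runs out
def whileA (l : List Int) (n : Int) (idx : Int) : Nat → Int
  | 0 => idx
  | fuel + 1 => if PySem.List.pyGetD l idx 0 ≤ n then whileA l n (idx + 1) fuel else idx

def indexOutFib (n : Int) : Int :=
  if n = 1 then 1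
  else if n = 2 then 2
  else
    let excessiveList := listFibA (n + 1)
    whileA excessiveList n 1 excessiveList.length

-- ===== PORT B =====
-- fibpair(m) = (fib m, fib (m+1)) by fast doubling; fuel = m only totalizes the 'm // 2' recursion
def fibPairB : Nat → Nat → Int × Int
  | 0, _ => (0, 1)
  | fuel + 1, m =>
    if m = 0 then (0, 1)
    else
      let p := fibPairB fuel (m / 2)
      let a := p.1
      let b := p.2
      let c := a * (2 * b - a)
      let d := a * a + b * b
      if m % 2 = 1 then (d, c + d) else (c, d)

def fibB (m : Nat) : Int := (fibPairB m m).1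

-- 'while fib(hi) <= n: hi *= 2'; fuel only totalizes the loop
def expSearchB (n : Int) (hi : Nat) : Nat → Nat
  | 0 => hi
  | fuel + 1 => if fibB hi ≤ n then expSearchB n (hi * 2) fuel else hi

-- 'while hi - lo > 1: …'; fuel only totalizes the loop (lo ≤ hi throughout, so Nat arithmetic is exact)
def binSearchB (n : Int) (lo hi : Nat) : Nat → Nat
  | 0 => lo
  | fuel + 1 =>
    if 1 < hi - lo then
      let mid := (lo + hi) / 2
      if fibB mid ≤ n then binSearchB n mid hi fuel else binSearchB n lo mid fuel
    else lo

def indexOutFib_alt (n : Int) : Int :=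
  let hi := expSearchB n 1 (n.toNat + 2)
  let lo := binSearchB n 1 hi hi
  (lo : Int) - 1

-- ===== PRECONDITION & SPEC =====
-- Python A asserts n >= 1 (AssertionError otherwise): exactly those inputs are excluded
def Pre_indexOutFib (n : Int) : Prop := 1 ≤ n
instance (n : Int) : Decidable (Pre_indexOutFib n) := by unfold Pre_indexOutFib; infer_instance
def pvWitness_indexOutFib : Int := 5

def Spec_indexOutFib (n : Int) (out : Int) : Prop := out = indexOutFib_alt n
instance (n : Int) (out : Int) : Decidable (Spec_indexOutFib n out) := by unfold Spec_indexOutFib; infer_instance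

-- ===== CLAIM (what is proved, stated in full; the proofs are below) =====
def Claim_equal_indexOutFib : Prop := ∀ (n : Int), Dom_indexOutFib n → Pre_indexOutFib n → Spec_indexOutFib n (indexOutFib n)

-- ===== LEMMAS AND PROOFS =====

-- the mathematical values A's list holds: fibL c = [fib 2, fib 3, …, fib (c+1)]
def fibL (c : Nat) : List Int := (List.range c).map (fun j => ((Nat.fib (j + 2) : Nat) : Int))

lemma fibL_length (c : Nat) : (fibL c).length = c := by simp [fibL]

lemma fibL_get (c j : Nat) (h : j < c) :
    PySem.List.pyGetD (fibL c) (j : Int) 0 = (Nat.fib (j + 2) : Int) := by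
  simp [fibL, PySem.List.pyGetD_natCast, List.getD_eq_getElem?_getD, h]

lemma listFibA_aux (t : Nat) :
    (PySem.List.pyRange 3 (3 + (t : Int)) 1).foldl
      (fun fibList i =>
        fibList ++ [PySem.List.pyGetD fibList (i - 2) 0 + PySem.List.pyGetD fibList (i - 3) 0])
      [1, 2] = fibL (t + 2) := by
  induction t with
  | zero =>
    rw [show (3 + ((0 : Nat) : Int)) = 3 by norm_num, PySem.List.pyRange_one_eq_nil le_rfl]
    decide
  | succ t ih =>
    rw [show (3 + ((t + 1 : Nat) : Int)) = (3 + (t : Int)) + 1 by push_cast; ring,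
      PySem.List.pyRange_one_succ_right (by omega), List.foldl_append, ih]
    simp only [List.foldl_cons, List.foldl_nil]
    rw [show (3 + (t : Int) - 2) = ((t + 1 : Nat) : Int) by push_cast; ring,
      show (3 + (t : Int) - 3) = ((t : Nat) : Int) by ring,
      fibL_get (t + 2) (t + 1) (by omega), fibL_get (t + 2) t (by omega)]
    have e : Nat.fib (t + 2 + 2) = Nat.fib (t + 2) + Nat.fib (t + 1 + 2) := Nat.fib_add_two
    have hfib : ((Nat.fib (t + 1 + 2) : Nat) : Int) + ((Nat.fib (t + 2) : Nat) : Int)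
        = ((Nat.fib (t + 2 + 2) : Nat) : Int) := by rw [e]; push_cast; ring
    have hstep : fibL ((t + 2) + 1) = fibL (t + 2) ++ [((Nat.fib (t + 2 + 2) : Nat) : Int)] := by
      unfold fibL
      rw [List.range_succ]
      simp
    rw [hfib, show t + 1 + 2 = (t + 2) + 1 from rfl, hstep]

lemma fib_lb (m : Nat) : m + 1 ≤ Nat.fib (m + 2) := by
  induction m with
  | zero => simp
  | succ k ih =>
    have h1 : 0 < Nat.fib (k + 1) := Nat.fib_pos.mpr (by omega)
    have h2 : Nat.fib (k + 1 + 2) = Nat.fib (k + 1) + Nat.fib (k + 1 + 1) := Nat.fib_add_two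
    have h3 : Nat.fib (k + 1 + 1) = Nat.fib (k + 2) := rfl
    omega

lemma whileA_eq (n : Int) (c r : Nat) (hr : r < c)
    (hbelow : ∀ j : Nat, 1 ≤ j → j < r → (Nat.fib (j + 2) : Int) ≤ n)
    (habove : n < (Nat.fib (r + 2) : Int)) :
    ∀ (fuel idx : Nat), idx ≤ r → r - idx < fuel → 1 ≤ idx →
      whileA (fibL c) n (idx : Int) fuel = (r : Int) := by
  intro fuel
  induction fuel with
  | zero => intro idx h1 h2 h3; omega
  | succ f ih =>
    intro idx h1 h2 h3
    simp only [whileA]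
    rw [fibL_get c idx (by omega)]
    by_cases he : idx = r
    · subst he
      rw [if_neg (by omega)]
    · have hlt : idx < r := by omega
      rw [if_pos (hbelow idx h3 hlt),
        show ((idx : Int) + 1) = ((idx + 1 : Nat) : Int) by push_cast; ring]
      exact ih (idx + 1) (by omega) (by omega) (by omega)

lemma fibPairB_eq : ∀ (fuel m : Nat), m ≤ fuel →
    fibPairB fuel m = (((Nat.fib m : Nat) : Int), ((Nat.fib (m + 1) : Nat) : Int)) := by
  intro fuel
  induction fuel with
  | zero =>
    intro m h
    have h0 : m = 0 := by omega
    subst h0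
    simp [fibPairB]
  | succ f ih =>
    intro m h
    by_cases h0 : m = 0
    · subst h0; simp [fibPairB]
    · have hrec := ih (m / 2) (by omega)
      have hle : Nat.fib (m / 2) ≤ 2 * Nat.fib (m / 2 + 1) := by
        have := Nat.fib_le_fib_succ (n := m / 2); omega
      have hc : (Nat.fib (m / 2) : Int) * (2 * (Nat.fib (m / 2 + 1) : Int) - (Nat.fib (m / 2) : Int))
          = (Nat.fib (2 * (m / 2)) : Int) := by
        rw [Nat.fib_two_mul]
        push_cast [Nat.cast_sub hle]
        ring
      have hd : (Nat.fib (m / 2) : Int) * (Nat.fib (m / 2) : Int)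
            + (Nat.fib (m / 2 + 1) : Int) * (Nat.fib (m / 2 + 1) : Int)
          = (Nat.fib (2 * (m / 2) + 1) : Int) := by
        rw [Nat.fib_two_mul_add_one]
        push_cast
        ring
      have hsum : (Nat.fib (2 * (m / 2)) : Int) + (Nat.fib (2 * (m / 2) + 1) : Int)
          = (Nat.fib (2 * (m / 2) + 2) : Int) := by
        rw [Nat.fib_add_two]
        push_cast
        ring
      by_cases hodd : m % 2 = 1
      · have hm : m = 2 * (m / 2) + 1 := by omega
        simp only [fibPairB, if_neg h0, if_pos hodd, hrec]
        rw [Prod.mk.injEq]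
        constructor
        · conv_rhs => rw [hm]
          linear_combination hd
        · conv_rhs => rw [hm]
          rw [show 2 * (m / 2) + 1 + 1 = 2 * (m / 2) + 2 from rfl]
          linear_combination hc + hd + hsum
      · have hm : m = 2 * (m / 2) := by omega
        simp only [fibPairB, if_neg h0, if_neg hodd, hrec]
        rw [Prod.mk.injEq]
        constructor
        · conv_rhs => rw [hm]
          linear_combination hc
        · conv_rhs => rw [hm]
          linear_combination hd

lemma fibB_eq (m : Nat) : fibB m = (Nat.fib m : Int) := by
  rw [fibB, fibPairB_eq m m le_rfl]

lemma expSearchB_ge (n : Int) : ∀ (fuel hi : Nat), hi ≤ expSearchB n hi fuel := by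
  intro fuel
  induction fuel with
  | zero => intro hi; simp [expSearchB]
  | succ f ih =>
    intro hi
    simp only [expSearchB]
    split
    · exact le_trans (by omega) (ih (hi * 2))
    · exact le_rfl

lemma expSearchB_gt (n : Int) : ∀ (fuel hi : Nat), 1 ≤ hi → n.toNat + 2 ≤ 2 ^ fuel * hi →
    n < fibB (expSearchB n hi fuel) := by
  intro fuel
  induction fuel with
  | zero =>
    intro hi h1 h2
    rw [pow_zero, one_mul] at h2
    simp only [expSearchB]
    obtain ⟨u, rfl⟩ : ∃ u, hi = u + 2 := ⟨hi - 2, by omega⟩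
    rw [fibB_eq]
    have := fib_lb u
    omega
  | succ f ih =>
    intro hi h1 h2
    simp only [expSearchB]
    split
    · apply ih (hi * 2) (by omega)
      calc n.toNat + 2 ≤ 2 ^ (f + 1) * hi := h2
        _ = 2 ^ f * (hi * 2) := by rw [pow_succ]; ring
    · omega

lemma binSearchB_spec (n : Int) : ∀ (fuel lo hi : Nat), lo < hi → hi - lo ≤ fuel →
    fibB lo ≤ n → n < fibB hi →
    lo ≤ binSearchB n lo hi fuel ∧ fibB (binSearchB n lo hi fuel) ≤ n ∧
      n < fibB (binSearchB n lo hi fuel + 1) := by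
  intro fuel
  induction fuel with
  | zero => intro lo hi h1 h2 _ _; omega
  | succ f ih =>
    intro lo hi h1 h2 hlo hhi
    by_cases hgap : 1 < hi - lo
    · simp only [binSearchB, if_pos hgap]
      by_cases hmid : fibB ((lo + hi) / 2) ≤ n
      · rw [if_pos hmid]
        obtain ⟨ha, hb, hc⟩ := ih ((lo + hi) / 2) hi (by omega) (by omega) hmid hhi
        exact ⟨by omega, hb, hc⟩
      · rw [if_neg hmid]
        exact ih lo ((lo + hi) / 2) (by omega) (by omega) hlo (by omega)
    · simp only [binSearchB, if_neg hgap]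
      have hsucc : hi = lo + 1 := by omega
      subst hsucc
      exact ⟨le_rfl, hlo, hhi⟩

lemma fib_bracket_uniq (n : Int) (a b : Nat)
    (ha1 : (Nat.fib a : Int) ≤ n) (ha2 : n < (Nat.fib (a + 1) : Int))
    (hb1 : (Nat.fib b : Int) ≤ n) (hb2 : n < (Nat.fib (b + 1) : Int)) : a = b := by
  rcases Nat.lt_trichotomy a b with h | h | h
  · have h1 : Nat.fib (a + 1) ≤ Nat.fib b := Nat.fib_mono (by omega)
    have h2 : (Nat.fib (a + 1) : Int) ≤ (Nat.fib b : Int) := by exact_mod_cast h1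
    omega
  · exact h
  · have h1 : Nat.fib (b + 1) ≤ Nat.fib a := Nat.fib_mono (by omega)
    have h2 : (Nat.fib (b + 1) : Int) ≤ (Nat.fib a : Int) := by exact_mod_cast h1
    omega

-- ===== VERDICT (by name: the statement is the Claim_ definition above) =====
theorem indexOutFib_spec : Claim_equal_indexOutFib := by
  intro n _ hpre
  unfold Pre_indexOutFib at hpre
  unfold Spec_indexOutFib
  by_cases h1 : n = 1
  · subst h1; decide
  by_cases h2 : n = 2
  · subst h2; decide
  have hn3 : 3 ≤ n := by omega
  set N := n.toNat with hN
  have hNn : (N : Int) = n := Int.toNat_of_nonneg (by omega)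
  have hN3 : 3 ≤ N := by omega
  have hex : ∃ j, n < (Nat.fib (j + 2) : Int) := ⟨N, by have := fib_lb N; omega⟩
  set r := Nat.find hex with hr
  have hPr : n < (Nat.fib (r + 2) : Int) := Nat.find_spec hex
  have hmin : ∀ j, j < r → ¬ n < (Nat.fib (j + 2) : Int) := fun j hj => Nat.find_min hex hj
  have hrN : r ≤ N := Nat.find_le (by have := fib_lb N; omega)
  have hr1 : 1 ≤ r := by
    rcases Nat.eq_zero_or_pos r with h | h
    · exfalso
      have h0 := hPr
      rw [h] at h0
      have hf2 : Nat.fib (0 + 2) = 1 := by decide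
      rw [hf2] at h0
      omega
    · exact h
  have hrfib : (Nat.fib (r + 1) : Int) ≤ n := by
    have hmr := hmin (r - 1) (by omega)
    rw [show r - 1 + 2 = r + 1 by omega] at hmr
    omega
  -- A's side: the scan stops exactly at index r
  have hA : indexOutFib n = (r : Int) := by
    simp only [indexOutFib, if_neg h1, if_neg h2]
    have hlist : listFibA (n + 1) = fibL (N + 1) := by
      have haux := listFibA_aux (N - 1)
      rw [show N - 1 + 2 = N + 1 by omega,
        show (3 : Int) + ((N - 1 : Nat) : Int) = (n + 1) + 1 by omega] at haux
      unfold listFibA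
      exact haux
    rw [hlist, fibL_length]
    have := whileA_eq n (N + 1) r (by omega)
      (fun j hj1 hj2 => by have := hmin j hj2; omega) hPr (N + 1) 1 hr1 (by omega) le_rfl
    simpa using this
  -- B's side: exponential + binary search land on r + 1
  have hfib1 : fibB 1 ≤ n := by
    rw [fibB_eq, show Nat.fib 1 = 1 from rfl]
    omega
  have hB : indexOutFib_alt n = (r : Int) := by
    simp only [indexOutFib_alt]
    set hi := expSearchB n 1 (n.toNat + 2) with hhi
    have hge2 : 2 ≤ hi := by
      rw [hhi, show n.toNat + 2 = (n.toNat + 1) + 1 from rfl]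
      simp only [expSearchB, if_pos hfib1]
      have h12 : (1 : Nat) * 2 = 2 := rfl
      rw [h12]
      exact expSearchB_ge n (n.toNat + 1) 2
    have hgt : n < fibB hi := by
      rw [hhi]
      apply expSearchB_gt n (n.toNat + 2) 1 le_rfl
      have := Nat.lt_two_pow_self (n := n.toNat + 2)
      omega
    obtain ⟨hle, hb1, hb2⟩ := binSearchB_spec n hi 1 hi (by omega) (by omega) hfib1 hgt
    have huniq : binSearchB n 1 hi hi = r + 1 := by
      apply fib_bracket_uniq n _ (r + 1)
      · rw [fibB_eq] at hb1; exact hb1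
      · rw [fibB_eq] at hb2; exact hb2
      · exact hrfib
      · rw [show r + 1 + 1 = r + 2 from rfl]; exact hPr
    rw [huniq]
    push_cast
    ring
  rw [hA, hB]
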